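-- pv_equiv track=rewrite | github.com/DevMontee/portfolio | Code/kitti_sensor_fusion/Parameter Tuning/tuning_integration.py | _group_by_frame
-- ===== SOURCE A (Python) =====
-- from typing import Dict, Tuple, List
--
-- def _group_by_frame(objects: List[Dict]) -> Dict[int, List[Dict]]:
--     """Group objects by frame ID"""
--     grouped = {}
--     for obj in objects:
--         frame = obj['frame']
--         if frame not in grouped:
--             grouped[frame] = []
--         grouped[frame].append(obj)
--     return grouped
-- ===== SOURCE B (Python) =====
-- def _group_by_frame(objects):
--     """Group objects by frame ID (two-pass: ordered distinct frames, then filter per frame)"""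
--     frames = list(dict.fromkeys(o['frame'] for o in objects))
--     return {f: [o for o in objects if o['frame'] == f] for f in frames}
-- ===== Notes on version B (the rewrite author's own statement) =====
-- stated objective: alternative
-- what changed: A builds frame buckets incrementally in one dict-appending pass; B first collects the distinct frames in first-appearance order (dict.fromkeys) and then builds each group by filtering the whole list per frame, in a dict comprehension.
import Mathlib
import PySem

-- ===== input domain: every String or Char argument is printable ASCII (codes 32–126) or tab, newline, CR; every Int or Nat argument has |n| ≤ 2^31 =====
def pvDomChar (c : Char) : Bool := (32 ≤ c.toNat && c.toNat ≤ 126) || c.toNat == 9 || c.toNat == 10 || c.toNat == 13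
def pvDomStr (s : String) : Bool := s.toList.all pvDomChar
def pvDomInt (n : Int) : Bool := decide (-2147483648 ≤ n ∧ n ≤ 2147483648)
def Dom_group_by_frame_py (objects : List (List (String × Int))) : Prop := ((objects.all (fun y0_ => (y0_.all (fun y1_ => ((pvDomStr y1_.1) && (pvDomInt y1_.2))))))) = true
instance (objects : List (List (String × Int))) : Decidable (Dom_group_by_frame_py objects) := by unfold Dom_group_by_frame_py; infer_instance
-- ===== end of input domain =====

-- B replaces the single bucket-building pass with two passes: ordered distinct frames, then one filter per frame (objective: alternative, same observable dict).
-- ===== PORT A =====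
-- obj['frame'] on the dict obj; total form getD is used, Pre_ excludes the missing-key KeyError inputs
def pvFrameOf (obj : List (String × Int)) : Int :=
  PySem.Dict.getD (PySem.Dict.mk obj) "frame" 0

def group_by_frame_py (objects : List (List (String × Int))) : List (Int × List (List (String × Int))) :=
  (objects.foldl (fun grouped obj =>
      let frame := pvFrameOf obj
      let grouped := if grouped.contains frame then grouped else grouped.insert frame []
      grouped.modify frame [] (fun l => l ++ [obj]))
    PySem.Dict.empty).items

-- ===== PORT B =====
def group_by_frame_py_alt (objects : List (List (String × Int))) : List (Int × List (List (String × Int))) :=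
  let frames := PySem.List.dedup (objects.map pvFrameOf)
  frames.map (fun f => (f, objects.filter (fun o => pvFrameOf o == f)))

-- ===== PRECONDITION & SPEC =====
-- Pre_ excludes exactly the objects with no 'frame' key, where the Python A raises KeyError
def Pre_group_by_frame_py (objects : List (List (String × Int))) : Prop :=
  ∀ o ∈ objects, (PySem.Dict.mk o).contains "frame" = true
instance (objects : List (List (String × Int))) : Decidable (Pre_group_by_frame_py objects) := by unfold Pre_group_by_frame_py; infer_instance

def pvWitness_group_by_frame_py : (List (List (String × Int))) :=
  [[("frame", 2), ("x", 1)], [("frame", 1)], [("frame", 2), ("x", 3)]]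

def Spec_group_by_frame_py (objects : List (List (String × Int))) (out : List (Int × List (List (String × Int)))) : Prop := out = group_by_frame_py_alt objects
instance (objects : List (List (String × Int))) (out : List (Int × List (List (String × Int)))) : Decidable (Spec_group_by_frame_py objects out) := by unfold Spec_group_by_frame_py; infer_instance

-- ===== CLAIM (what is proved, stated in full; the proofs are below) =====
def Claim_equal_group_by_frame_py : Prop := ∀ (objects : List (List (String × Int))), Dom_group_by_frame_py objects → Pre_group_by_frame_py objects → Spec_group_by_frame_py objects (group_by_frame_py objects)

-- ===== LEMMAS AND PROOFS =====

-- A's "ensure empty bucket, then append" step is the plain modify-append step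
theorem pv_step_eq (d : PySem.Dict Int (List (List (String × Int)))) (k : Int)
    (f : List (List (String × Int)) → List (List (String × Int))) :
    PySem.Dict.modify (if d.contains k then d else d.insert k []) k [] f = d.modify k [] f := by
  by_cases h : d.contains k
  · simp [h]
  · have h' : d.contains k = false := by simpa using h
    simp [PySem.Dict.modify, h', PySem.Dict.getD_insert_self, PySem.Dict.insert_insert_self,
      PySem.Dict.getD_of_not_contains]

-- A's loop, with the step rewritten, is a modify-append fold
theorem pv_foldA_eq (objects : List (List (String × Int))) :
    (objects.foldl (fun grouped obj =>
        let frame := pvFrameOf obj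
        let grouped := if grouped.contains frame then grouped else grouped.insert frame []
        grouped.modify frame [] (fun l => l ++ [obj]))
      PySem.Dict.empty)
    = ((objects.map (fun o => (pvFrameOf o, o))).foldl
        (fun d p => d.modify p.1 [] (fun l => l ++ [p.2])) PySem.Dict.empty) := by
  rw [List.foldl_map]
  exact PySem.List.foldl_congr_mem objects _ _ PySem.Dict.empty (fun d obj _ => pv_step_eq d (pvFrameOf obj) (fun l => l ++ [obj]))

theorem group_by_frame_py_eq_alt (objects : List (List (String × Int))) :
    group_by_frame_py objects = group_by_frame_py_alt objects := by
  unfold group_by_frame_py group_by_frame_py_alt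
  rw [pv_foldA_eq]
  set l := objects.map (fun o => (pvFrameOf o, o)) with hl
  set D := l.foldl (fun d p => d.modify p.1 [] (fun x => x ++ [p.2])) PySem.Dict.empty with hD
  have hkeys : D.keys = PySem.List.dedup (objects.map pvFrameOf) := by
    have h1 := PySem.Dict.keys_foldl_modify_key (κ := Int) l Prod.fst []
      (fun _ p v => v ++ [p.2]) PySem.Dict.empty
    have h2 : D.keys = PySem.Set.update PySem.Dict.empty.keys (List.map Prod.fst l) := h1
    rw [h2, hl]
    simp [PySem.Dict.keys_empty, PySem.Set.update, PySem.List.dedup, PySem.Set.ofList,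
        List.map_map, Function.comp_def]
  have hnodup : D.keys.Nodup :=
    PySem.Dict.nodup_keys_foldl_modify_key l Prod.fst [] (fun _ p v => v ++ [p.2])
      PySem.Dict.empty (by simp [PySem.Dict.keys_empty])
  rw [PySem.Dict.items_eq_map_keys D hnodup [], hkeys]
  refine List.map_congr_left (fun f _ => ?_)
  have hg : D.getD f [] = (objects.filter (fun o => pvFrameOf o == f)) := by
    rw [hD, PySem.Dict.getD_foldl_modify_append l PySem.Dict.empty f, hl]
    simp [List.filter_map, Function.comp_def]
  rw [hg]

-- ===== VERDICT (by name: the statement is the Claim_ definition above) =====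
theorem group_by_frame_py_spec : Claim_equal_group_by_frame_py :=
  fun objects _ _ => group_by_frame_py_eq_alt objects
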